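-- pv_equiv track=rewrite | github.com/jeongminllee/ProgrammersCodeTest | 백준/Bronze/16306. Cardboard Container/Cardboard Container.py | sol_16306
-- ===== SOURCE A (Python) =====
-- INF = 1 << 32
--
-- def sol_16306(n) :
--     res = INF
--
--     i = 1
--     while i ** 3 <= n :
--         if n % i != 0 :
--             i += 1
--             continue
--
--         n_div_i = n // i
--         j = i
--         while j * j <= n_div_i :
--             if n_div_i % j != 0 :
--                 j += 1
--                 continue
--
--             k = n_div_i // j
--             surface_area = 2 * (i*j + j*k + k*i)
--             res = min(res, surface_area)
--             j += 1
--         i += 1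
--     return res
-- ===== SOURCE B (Python) =====
-- INF = 1 << 32
--
-- def sol_16306(n):
--     # Precompute all divisors of n up to sqrt(n) once, then combine pairs
--     # (i, j) of table entries instead of re-running trial division per i.
--     small = []
--     d = 1
--     while d * d <= n:
--         if n % d == 0:
--             small.append(d)
--         d += 1
--
--     res = INF
--     for i in small:
--         if i ** 3 > n:
--             continue
--         m = n // i
--         for j in small:
--             if j < i or j * j > m or m % j != 0:
--                 continue
--             k = m // j
--             res = min(res, 2 * (i * j + j * k + k * i))
--     return res
-- ===== Notes on version B (the rewrite author's own statement) =====
-- stated objective: alternative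
-- what changed: B precomputes the sorted list of all divisors of n up to sqrt(n) in one trial-division pass and then combines pairs of table entries, replacing A's nested inline trial-division loops (a fresh sqrt(n/i) scan per i) with a divisor table and a filtering combine pass.
import Mathlib
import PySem

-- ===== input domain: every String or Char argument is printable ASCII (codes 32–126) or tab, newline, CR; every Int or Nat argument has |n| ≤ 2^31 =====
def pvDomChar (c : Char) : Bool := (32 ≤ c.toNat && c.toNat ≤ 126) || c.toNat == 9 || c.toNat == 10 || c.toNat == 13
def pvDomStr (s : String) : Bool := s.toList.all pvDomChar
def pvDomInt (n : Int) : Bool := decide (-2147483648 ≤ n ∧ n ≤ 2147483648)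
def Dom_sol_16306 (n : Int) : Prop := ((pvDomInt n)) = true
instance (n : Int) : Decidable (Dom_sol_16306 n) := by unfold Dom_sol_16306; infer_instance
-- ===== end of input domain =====

-- B replaces A's nested inline trial division by a precomputed divisor table plus a combining
-- pass over table entries (alternative decomposition, similar cost); return values are identical.

-- ===== PORT A =====
-- inner 'while j * j <= n_div_i' loop of A; fuel only makes the recursion total,
-- the supplied fuel is always sufficient (proved below)
def sol16306_loopJ (fuel : Nat) (i m j res : Int) : Int :=
  match fuel with
  | 0 => res
  | f + 1 =>
    if j * j ≤ m then
      if PySem.Int.mod m j ≠ 0 then sol16306_loopJ f i m (j + 1) res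
      else
        let k := PySem.Int.floordiv m j
        sol16306_loopJ f i m (j + 1) (min res (2 * (i * j + j * k + k * i)))
    else res

-- outer 'while i ** 3 <= n' loop of A
def sol16306_loopI (fuel : Nat) (n i res : Int) : Int :=
  match fuel with
  | 0 => res
  | f + 1 =>
    if i ^ 3 ≤ n then
      if PySem.Int.mod n i ≠ 0 then sol16306_loopI f n (i + 1) res
      else
        let m := PySem.Int.floordiv n i
        sol16306_loopI f n (i + 1) (sol16306_loopJ (m.toNat + 1) i m i res)
    else res

-- INF = 1 << 32 = 4294967296
def sol_16306 (n : Int) : Int := sol16306_loopI (n.toNat + 1) n 1 4294967296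

-- ===== PORT B =====
-- 'while d * d <= n: if n % d == 0: small.append(d)' (fuel again only for totality)
def sol16306_altSmall (fuel : Nat) (n d : Int) (acc : List Int) : List Int :=
  match fuel with
  | 0 => acc
  | f + 1 =>
    if d * d ≤ n then
      sol16306_altSmall f n (d + 1) (if PySem.Int.mod n d = 0 then acc ++ [d] else acc)
    else acc

-- 'for j in small: …' inner loop of B
def sol16306_altInner (small : List Int) (i m res : Int) : Int :=
  small.foldl (fun r j =>
    if j < i ∨ m < j * j ∨ PySem.Int.mod m j ≠ 0 then r
    else
      let k := PySem.Int.floordiv m j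
      min r (2 * (i * j + j * k + k * i))) res

def sol_16306_alt (n : Int) : Int :=
  let small := sol16306_altSmall (n.toNat + 1) n 1 []
  small.foldl (fun r i =>
    if n < i ^ 3 then r
    else sol16306_altInner small i (PySem.Int.floordiv n i) r) 4294967296

-- ===== PRECONDITION & SPEC =====
def Spec_sol_16306 (n : Int) (out : Int) : Prop := out = sol_16306_alt n
instance (n : Int) (out : Int) : Decidable (Spec_sol_16306 n out) := by unfold Spec_sol_16306; infer_instance

-- ===== CLAIM (what is proved, stated in full; the proofs are below) =====
def Claim_equal_sol_16306 : Prop := ∀ (n : Int), Dom_sol_16306 n → Spec_sol_16306 n (sol_16306 n)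

-- ===== LEMMAS AND PROOFS =====

-- the canonical step of A's inner loop, as a fold step over an integer range
def pvStepJ (i m : Int) (r j : Int) : Int :=
  if j * j ≤ m ∧ PySem.Int.mod m j = 0 then
    min r (2 * (i * j + j * (PySem.Int.floordiv m j) + (PySem.Int.floordiv m j) * i))
  else r

-- the canonical step of A's outer loop
def pvStepI (n : Int) (r i : Int) : Int :=
  if i ^ 3 ≤ n ∧ PySem.Int.mod n i = 0 then
    List.foldl (pvStepJ i (PySem.Int.floordiv n i)) r
      (PySem.List.pyRange i (PySem.Int.floordiv n i + 1))
  else r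

-- the divisor-table membership predicate of B
def pvP (n : Int) (e : Int) : Bool := decide (e * e ≤ n ∧ PySem.Int.mod n e = 0)

theorem pv_foldl_skip {α : Type} (f : Int → α → Int) (l : List α) (r : Int)
    (h : ∀ x ∈ l, ∀ s, f s x = s) : List.foldl f r l = r := by
  induction l generalizing r with
  | nil => rfl
  | cons a t ih =>
    simp only [List.foldl_cons, h a (by simp)]
    exact ih r (fun x hx s => h x (List.mem_cons_of_mem a hx) s)

theorem pv_loopJ_eq (f : Nat) (i m j res : Int) (hj : 1 ≤ j)
    (hf : (m + 1 - j).toNat < f) :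
    sol16306_loopJ f i m j res =
      List.foldl (pvStepJ i m) res (PySem.List.pyRange j (m + 1)) := by
  induction f generalizing j res with
  | zero => omega
  | succ f ih =>
    by_cases hjm : j * j ≤ m
    · have hjle : j ≤ m := le_trans (by nlinarith) hjm
      rw [PySem.List.pyRange_one_cons (by omega : j < m + 1)]
      simp only [List.foldl_cons]
      by_cases hmod : PySem.Int.mod m j = 0
      · have : pvStepJ i m res j =
            min res (2 * (i * j + j * (PySem.Int.floordiv m j) + (PySem.Int.floordiv m j) * i)) := by
          simp [pvStepJ, hjm, hmod]
        rw [this, sol16306_loopJ]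
        simp only [hjm, if_true, hmod, ne_eq, not_true_eq_false, if_false]
        exact ih _ _ (by omega) (by omega)
      · have : pvStepJ i m res j = res := by simp [pvStepJ, hmod]
        rw [this, sol16306_loopJ]
        simp only [hjm, if_true, ne_eq, hmod, not_false_eq_true, if_true]
        exact ih _ _ (by omega) (by omega)
    · rw [sol16306_loopJ]
      simp only [hjm, if_false]
      refine (pv_foldl_skip _ _ _ ?_).symm
      intro x hx s
      have hx' := PySem.List.mem_pyRange_one.mp hx
      have hle : j * j ≤ x * x := mul_le_mul hx'.1 hx'.1 (by omega) (by omega)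
      have : ¬ x * x ≤ m := by omega
      simp [pvStepJ, this]

theorem pv_loopI_eq (f : Nat) (n i res : Int) (hi : 1 ≤ i)
    (hf : (n + 1 - i).toNat < f) :
    sol16306_loopI f n i res =
      List.foldl (pvStepI n) res (PySem.List.pyRange i (n + 1)) := by
  induction f generalizing i res with
  | zero => omega
  | succ f ih =>
    by_cases hin : i ^ 3 ≤ n
    · have hile : i ≤ n := le_trans (le_self_pow₀ hi (by norm_num)) hin
      rw [PySem.List.pyRange_one_cons (by omega : i < n + 1)]
      simp only [List.foldl_cons]
      by_cases hmod : PySem.Int.mod n i = 0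
      · have hstep : pvStepI n res i =
            List.foldl (pvStepJ i (PySem.Int.floordiv n i)) res
              (PySem.List.pyRange i (PySem.Int.floordiv n i + 1)) := by
          simp [pvStepI, hin, hmod]
        rw [hstep, sol16306_loopI]
        simp only [hin, if_true, ne_eq, hmod, not_true_eq_false, if_false]
        rw [pv_loopJ_eq _ _ _ _ _ hi (by omega)]
        exact ih _ _ (by omega) (by omega)
      · have hstep : pvStepI n res i = res := by simp [pvStepI, hmod]
        rw [hstep, sol16306_loopI]
        simp only [hin, if_true, ne_eq, hmod, not_false_eq_true, if_true]
        exact ih _ _ (by omega) (by omega)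
    · rw [sol16306_loopI]
      simp only [hin, if_false]
      refine (pv_foldl_skip _ _ _ ?_).symm
      intro x hx s
      have hx' := PySem.List.mem_pyRange_one.mp hx
      have : ¬ x ^ 3 ≤ n := by
        nlinarith [pow_le_pow_left₀ (show (0:Int) ≤ i by omega) hx'.1 3]
      simp [pvStepI, this]

theorem pv_small_eq (f : Nat) (n d : Int) (acc : List Int) (hd : 1 ≤ d)
    (hf : (n + 1 - d).toNat < f) :
    sol16306_altSmall f n d acc =
      acc ++ (PySem.List.pyRange d (n + 1)).filter (pvP n) := by
  induction f generalizing d acc with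
  | zero => omega
  | succ f ih =>
    by_cases hdn : d * d ≤ n
    · have hdle : d ≤ n := le_trans (by nlinarith) hdn
      rw [PySem.List.pyRange_one_cons (by omega : d < n + 1)]
      rw [sol16306_altSmall]
      simp only [hdn, if_true]
      rw [ih _ _ (by omega) (by omega)]
      by_cases hmod : PySem.Int.mod n d = 0
      · simp [pvP, hmod, hdn]
      · simp [pvP, hmod]
    · rw [sol16306_altSmall]
      simp only [hdn, if_false]
      have : (PySem.List.pyRange d (n + 1)).filter (pvP n) = [] := by
        apply List.filter_eq_nil_iff.mpr
        intro x hx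
        have hx' := PySem.List.mem_pyRange_one.mp hx
        have : ¬ x * x ≤ n := by nlinarith [hx'.1]
        simp [pvP, this]
      simp [this]

-- the meat: A's inner trial-division fold over [i, √m] equals B's filtering pass over the divisor table
theorem pv_inner_eq (n i r : Int) (hi : 1 ≤ i) (hin : i ^ 3 ≤ n)
    (hmod : PySem.Int.mod n i = 0) :
    List.foldl (pvStepJ i (PySem.Int.floordiv n i)) r
      (PySem.List.pyRange i (PySem.Int.floordiv n i + 1)) =
    sol16306_altInner ((PySem.List.pyRange 1 (n + 1)).filter (pvP n)) i
      (PySem.Int.floordiv n i) r := by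
  have hipos : (0:Int) < i := by omega
  have hdvd : i ∣ n := (PySem.Int.mod_eq_zero_iff_dvd n i).mp hmod
  have hnpos : (0:Int) < n := lt_of_lt_of_le (pow_pos hipos 3) hin
  set m := PySem.Int.floordiv n i with hm
  have hmval : m = n / i := PySem.Int.floordiv_eq_ediv_of_pos hipos
  have hnm : i * m = n := by rw [hmval]; exact Int.mul_ediv_cancel' hdvd
  have hi2m : i ^ 2 ≤ m := by nlinarith
  have him : i ≤ m := by nlinarith
  have hmn : m ≤ n := by nlinarith
  -- B's side: fold over the filtered table = guarded fold over the full range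
  rw [sol16306_altInner, ← PySem.List.foldl_if_eq_foldl_filter (pvP n)]
  -- A's side: extend the range [i, m+1) to [1, n+1) by identity steps
  rw [PySem.List.pyRange_one_append 1 i (n+1) (by omega) (by omega),
      PySem.List.pyRange_one_append i (m+1) (n+1) (by omega) (by omega)]
  rw [List.foldl_append, List.foldl_append]
  -- prefix [1, i): B's guarded step is identity (j < i)
  have hpre : ∀ s, List.foldl
      (fun r j => if pvP n j = true then
        (if j < i ∨ m < j * j ∨ PySem.Int.mod m j ≠ 0 then r
         else min r (2 * (i * j + j * (PySem.Int.floordiv m j) + (PySem.Int.floordiv m j) * i))) else r)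
      s (PySem.List.pyRange 1 i) = s := by
    intro s
    apply pv_foldl_skip
    intro x hx t
    have hx' := PySem.List.mem_pyRange_one.mp hx
    have : x < i := hx'.2
    simp [this]
  rw [hpre]
  -- suffix [m+1, n+1): both steps are identity (j*j > m)
  rw [pv_foldl_skip _ (PySem.List.pyRange (m+1) (n+1)) _ ?hsuf]
  case hsuf =>
    intro x hx t
    have hx' := PySem.List.mem_pyRange_one.mp hx
    have hgt : m < x * x := by nlinarith [hx'.1]
    simp [hgt]
  -- middle [i, m+1): the two steps agree pointwise
  apply PySem.List.foldl_congr_mem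
  intro s x hx
  have hx' := PySem.List.mem_pyRange_one.mp hx
  have hxi : i ≤ x := hx'.1
  have hx1 : (1:Int) ≤ x := le_trans hi hxi
  by_cases hg : x * x ≤ m ∧ PySem.Int.mod m x = 0
  · -- active element: it is in the table and passes B's guard
    have hxdm : x ∣ m := (PySem.Int.mod_eq_zero_iff_dvd m x).mp hg.2
    have hxdn : x ∣ n := hnm ▸ Dvd.dvd.mul_left hxdm i
    have hpx : pvP n x = true := by
      simp only [pvP, decide_eq_true_eq]
      exact ⟨le_trans hg.1 hmn, (PySem.Int.mod_eq_zero_iff_dvd n x).mpr hxdn⟩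
    have hnlt : ¬ (x < i ∨ m < x * x ∨ PySem.Int.mod m x ≠ 0) := by
      push Not; exact ⟨hxi, hg.1, hg.2⟩
    simp only [pvStepJ]
    rw [if_pos hg, if_pos hpx, if_neg hnlt]
  · -- inactive element: both sides keep the accumulator
    have hskip : (if x < i ∨ m < x * x ∨ PySem.Int.mod m x ≠ 0 then s
         else min s (2 * (i * x + x * (PySem.Int.floordiv m x) + (PySem.Int.floordiv m x) * i))) = s := by
      rw [if_pos]
      rcases not_and_or.mp hg with h | h
      · exact Or.inr (Or.inl (by omega))
      · exact Or.inr (Or.inr h)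
    simp only [pvStepJ, hg, if_false]
    by_cases hpx : pvP n x = true <;> simp [hpx, hskip]

-- ===== VERDICT (by name: the statement is the Claim_ definition above) =====
theorem sol_16306_spec : Claim_equal_sol_16306 := by
  intro n _
  unfold Spec_sol_16306 sol_16306 sol_16306_alt
  rw [pv_loopI_eq _ _ _ _ (by omega) (by omega)]
  rw [pv_small_eq _ _ _ _ (by omega) (by omega)]
  simp only [List.nil_append]
  rw [← PySem.List.foldl_if_eq_foldl_filter (pvP n)]
  apply PySem.List.foldl_congr_mem
  intro r x hx
  have hx' := PySem.List.mem_pyRange_one.mp hx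
  have hx1 : (1:Int) ≤ x := hx'.1
  by_cases hg : x ^ 3 ≤ n ∧ PySem.Int.mod n x = 0
  · have hpx : pvP n x = true := by
      simp only [pvP, decide_eq_true_eq]
      exact ⟨by nlinarith [hg.1], hg.2⟩
    have hnlt : ¬ n < x ^ 3 := not_lt.mpr hg.1
    rw [pvStepI, if_pos hg]
    rw [if_pos hpx, if_neg hnlt]
    exact pv_inner_eq n x r hx1 hg.1 hg.2
  · rw [pvStepI, if_neg hg]
    rcases not_and_or.mp hg with h | h
    · by_cases hpx : pvP n x = true
      · rw [if_pos hpx, if_pos (not_le.mp h)]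
      · rw [if_neg hpx]
    · have hpx : ¬ pvP n x = true := by
        simp only [pvP, decide_eq_true_eq, not_and]
        intro _; exact h
      rw [if_neg hpx]
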